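-- pv_equiv track=rewrite | github.com/NTHU-NLPLAB/error_ngram | new_find.py | divide_triedit_noedit
-- ===== SOURCE A (Python) =====
-- def divide_triedit_noedit(aft_tokens, reserved='about'):
--     noedit_list, triedit_list = [[]], []
--
--     for i, tk in enumerate(aft_tokens):
--         if '+}' in tk: # reserved word ，應該是不會有 [--] 出現
--             if i > 0 and i+1 < len(aft_tokens):
--                 triedit_list.append(tuple(aft_tokens[i-1:i+2]))
--
--             noedit_list.append([])
--         else:
--             noedit_list[-1].append(tk)
--
--     return noedit_list, triedit_list
-- ===== SOURCE B (Python) =====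
-- def divide_triedit_noedit(aft_tokens, reserved='about'):
--     # two-pass decomposition: find marker indices, then slice segments between them
--     markers = [i for i, tk in enumerate(aft_tokens) if '+}' in tk]
--     triedit_list = [tuple(aft_tokens[i-1:i+2])
--                     for i in markers if 0 < i and i + 1 < len(aft_tokens)]
--     noedit_list = []
--     prev = 0
--     for m in markers:
--         noedit_list.append(aft_tokens[prev:m])
--         prev = m + 1
--     noedit_list.append(aft_tokens[prev:])
--     return noedit_list, triedit_list
-- ===== Notes on version B (the rewrite author's own statement) =====
-- stated objective: alternative
-- what changed: A's single fused loop that mutates the last segment and appends triples in flight is replaced by a two-pass decomposition: first collect marker indices, then build the tri-edit triples by slicing around each interior marker and the no-edit groups by slicing between consecutive markers.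
import Mathlib
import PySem

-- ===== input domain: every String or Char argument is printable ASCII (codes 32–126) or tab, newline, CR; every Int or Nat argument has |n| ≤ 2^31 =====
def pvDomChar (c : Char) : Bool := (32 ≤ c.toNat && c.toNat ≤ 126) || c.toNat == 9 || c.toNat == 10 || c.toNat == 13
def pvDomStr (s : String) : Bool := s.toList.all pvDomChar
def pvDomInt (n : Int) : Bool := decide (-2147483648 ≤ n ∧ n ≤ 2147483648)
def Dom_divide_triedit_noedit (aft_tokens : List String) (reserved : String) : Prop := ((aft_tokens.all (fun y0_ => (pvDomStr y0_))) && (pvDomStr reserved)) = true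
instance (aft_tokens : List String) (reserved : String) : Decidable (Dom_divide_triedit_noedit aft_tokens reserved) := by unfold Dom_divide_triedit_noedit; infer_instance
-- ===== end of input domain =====

-- B replaces A's fused single loop (mutating the last segment) by a two-pass
-- decomposition: collect marker indices, then slice between them (objective: alternative).

-- ===== PORT A =====
-- tuple(l) for a 3-element slice (as an Option; the slice always has 3 elements where it is used)
def dtnTuple3 (l : List String) : Option (String × String × String) :=
  match l with
  | [a, b, c] => some (a, b, c)
  | _ => none

-- noedit_list[-1].append(tk)
def dtnAppendLast (ne : List (List String)) (tk : String) : List (List String) :=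
  match ne with
  | [] => [[tk]]
  | [l] => [l ++ [tk]]
  | l :: ls => l :: dtnAppendLast ls tk

def divide_triedit_noedit (aft_tokens : List String) (reserved : String) :
    List (List String) × (List (String × String × String)) :=
  (PySem.List.enumerate aft_tokens 0).foldl
    (fun st p =>
      if PySem.Str.isIn "+}" p.2 then
        let tri :=
          if 0 < p.1 ∧ p.1 + 1 < (aft_tokens.length : Int) then
            -- triedit_list.append(tuple(aft_tokens[i-1:i+2]))
            match dtnTuple3 (PySem.List.slice aft_tokens (some (p.1 - 1)) (some (p.1 + 2))) with
            | some t => st.2 ++ [t]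
            | none => st.2
          else st.2
        (st.1 ++ [[]], tri)
      else (dtnAppendLast st.1 p.2, st.2))
    ([[]], [])

-- ===== PORT B =====
def divide_triedit_noedit_alt (aft_tokens : List String) (reserved : String) :
    List (List String) × (List (String × String × String)) :=
  let markers : List Int :=
    (PySem.List.enumerate aft_tokens 0).filterMap
      (fun p => if PySem.Str.isIn "+}" p.2 then some p.1 else none)
  let triedit : List (String × String × String) :=
    markers.filterMap (fun i =>
      if 0 < i ∧ i + 1 < (aft_tokens.length : Int) then
        dtnTuple3 (PySem.List.slice aft_tokens (some (i - 1)) (some (i + 2)))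
      else none)
  let step := markers.foldl
    (fun (st : List (List String) × Int) m =>
      (st.1 ++ [PySem.List.slice aft_tokens (some st.2) (some m)], m + 1))
    ([], 0)
  (step.1 ++ [PySem.List.slice aft_tokens (some step.2) none], triedit)

-- ===== PRECONDITION & SPEC =====
def Spec_divide_triedit_noedit (aft_tokens : List String) (reserved : String) (out : List (List String) × (List (String × String × String))) : Prop := out = divide_triedit_noedit_alt aft_tokens reserved
instance (aft_tokens : List String) (reserved : String) (out : List (List String) × (List (String × String × String))) : Decidable (Spec_divide_triedit_noedit aft_tokens reserved out) := by unfold Spec_divide_triedit_noedit; infer_instance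

-- ===== CLAIM (what is proved, stated in full; the proofs are below) =====
def Claim_equal_divide_triedit_noedit : Prop := ∀ (aft_tokens : List String) (reserved : String), Dom_divide_triedit_noedit aft_tokens reserved → Spec_divide_triedit_noedit aft_tokens reserved (divide_triedit_noedit aft_tokens reserved)

-- ===== LEMMAS AND PROOFS =====

-- the two components of A's loop step, named for the proofs
def dtnNeStep (ne : List (List String)) (p : Int × String) : List (List String) :=
  if PySem.Str.isIn "+}" p.2 then ne ++ [[]] else dtnAppendLast ne p.2

def dtnTriOpt (xs : List String) (p : Int × String) : Option (String × String × String) :=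
  if PySem.Str.isIn "+}" p.2 then
    if 0 < p.1 ∧ p.1 + 1 < (xs.length : Int) then
      dtnTuple3 (PySem.List.slice xs (some (p.1 - 1)) (some (p.1 + 2)))
    else none
  else none

-- reference segmentation: first segment, remaining segments
def dtnSegs (ts : List String) : List String × List (List String) :=
  match ts with
  | [] => ([], [])
  | tk :: ts =>
    if PySem.Str.isIn "+}" tk then ([], (dtnSegs ts).1 :: (dtnSegs ts).2)
    else (tk :: (dtnSegs ts).1, (dtnSegs ts).2)

-- marker indices of ts, starting at index s
def dtnMks (s : Int) (ts : List String) : List Int :=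
  match ts with
  | [] => []
  | tk :: ts => if PySem.Str.isIn "+}" tk then s :: dtnMks (s + 1) ts else dtnMks (s + 1) ts

theorem dtnAppendLast_snoc (init : List (List String)) (cur : List String) (tk : String) :
    dtnAppendLast (init ++ [cur]) tk = init ++ [cur ++ [tk]] := by
  induction init with
  | nil => simp [dtnAppendLast]
  | cons a init ih =>
    obtain ⟨c, l', hc⟩ := List.exists_cons_of_ne_nil
      (List.append_ne_nil_of_right_ne_nil init (by simp) : init ++ [cur] ≠ [])
    rw [List.cons_append, hc]
    show a :: dtnAppendLast (c :: l') tk = _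
    rw [← hc, ih]
    simp

theorem dtn_foldl_append_toList {α β : Type} (h : α → Option β) (l : List α) (init : List β) :
    l.foldl (fun acc x => acc ++ (h x).toList) init = init ++ l.filterMap h := by
  induction l generalizing init with
  | nil => simp
  | cons x l ih => cases hx : h x <;> simp [hx, ih]

-- A's noedit accumulator is the reference segmentation
theorem dtnA_ne (ts : List String) : ∀ (s : Int) (init : List (List String)) (cur : List String),
    (PySem.List.enumerate ts s).foldl dtnNeStep (init ++ [cur])
    = init ++ (cur ++ (dtnSegs ts).1) :: (dtnSegs ts).2 := by
  induction ts with
  | nil => intro s init cur; simp [PySem.List.enumerate_nil, dtnSegs]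
  | cons tk ts ih =>
    intro s init cur
    rw [PySem.List.enumerate_cons, List.foldl_cons]
    by_cases hm : PySem.Chars.isIn ['+', '}'] tk.toList = true
    · have h1 : dtnNeStep (init ++ [cur]) (s, tk) = (init ++ [cur]) ++ [[]] := by
        simp [dtnNeStep, hm]
      rw [h1, show (init ++ [cur]) ++ [[]] = (init ++ [cur]) ++ [([] : List String)] from rfl,
        ih (s + 1) (init ++ [cur]) []]
      simp [dtnSegs, hm]
    · have h1 : dtnNeStep (init ++ [cur]) (s, tk) = init ++ [cur ++ [tk]] := by
        simp [dtnNeStep, hm, dtnAppendLast_snoc]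
      rw [h1, ih (s + 1) init (cur ++ [tk])]
      simp [dtnSegs, hm]

-- the marker list B computes is dtnMks
theorem dtn_markers (ts : List String) : ∀ (s : Int),
    (PySem.List.enumerate ts s).filterMap
      (fun p => if PySem.Str.isIn "+}" p.2 then some p.1 else none) = dtnMks s ts := by
  induction ts with
  | nil => intro s; simp [PySem.List.enumerate_nil, dtnMks]
  | cons tk ts ih =>
    intro s
    rw [PySem.List.enumerate_cons, List.filterMap_cons]
    by_cases hm : PySem.Chars.isIn ['+', '}'] tk.toList = true
    · have h1 : (if PySem.Str.isIn "+}" (s, tk).2 = true then some (s, tk).1 else none)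
          = some s := by simp [hm]
      rw [h1]
      dsimp only
      rw [ih (s + 1)]
      simp [dtnMks, hm]
    · have h1 : (if PySem.Str.isIn "+}" (s, tk).2 = true then some (s, tk).1 else none)
          = (none : Option Int) := by simp [hm]
      rw [h1]
      dsimp only
      rw [ih (s + 1)]
      simp [dtnMks, hm]

-- B's boundary fold over the markers of the suffix rebuilds the reference segmentation
theorem dtnB_ne (xs : List String) (ts : List String) :
    ∀ (s p : Int) (acc : List (List String)) (pend : List String),
    0 ≤ p → p ≤ s → xs.drop p.toNat = pend ++ ts → pend.length = (s - p).toNat →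
    (let r := (dtnMks s ts).foldl
        (fun (st : List (List String) × Int) m =>
          (st.1 ++ [PySem.List.slice xs (some st.2) (some m)], m + 1)) (acc, p)
     r.1 ++ [PySem.List.slice xs (some r.2) none])
    = acc ++ (pend ++ (dtnSegs ts).1) :: (dtnSegs ts).2 := by
  induction ts with
  | nil =>
    intro s p acc pend hp hps hdrop hlen
    simp only [dtnMks, List.foldl_nil, dtnSegs]
    rw [PySem.List.slice_from _ hp, hdrop]
  | cons tk ts ih =>
    intro s p acc pend hp hps hdrop hlen
    have hdrop' : xs.drop ((s : Int) + 1).toNat = ts := by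
      have h1 : ((s : Int) + 1).toNat = p.toNat + (pend.length + 1) := by omega
      rw [h1, ← List.drop_drop, hdrop]
      simp
    by_cases hm : PySem.Chars.isIn ['+', '}'] tk.toList = true
    · have hmk : dtnMks s (tk :: ts) = s :: dtnMks (s + 1) ts := by simp [dtnMks, hm]
      rw [hmk]
      simp only [List.foldl_cons]
      have hslice : PySem.List.slice xs (some p) (some s) = pend := by
        rw [PySem.List.slice_toNat _ hp (by omega), hdrop]
        have h2 : s.toNat - p.toNat = pend.length := by omega
        rw [h2]
        simp
      rw [hslice, ih (s + 1) (s + 1) (acc ++ [pend]) [] (by omega) (by omega)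
        (by simpa using hdrop') (by simp)]
      simp [dtnSegs, hm]
    · have hmk : dtnMks s (tk :: ts) = dtnMks (s + 1) ts := by simp [dtnMks, hm]
      rw [hmk, ih (s + 1) p acc (pend ++ [tk]) hp (by omega) (by simpa using hdrop)
        (by simp; omega)]
      simp [dtnSegs, hm]

-- ===== VERDICT (by name: the statement is the Claim_ definition above) =====
theorem divide_triedit_noedit_spec : Claim_equal_divide_triedit_noedit := by
  intro xs reserved _
  show divide_triedit_noedit xs reserved = divide_triedit_noedit_alt xs reserved
  unfold divide_triedit_noedit divide_triedit_noedit_alt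
  dsimp only
  have hstep : (fun (st : List (List String) × List (String × String × String))
        (p : Int × String) =>
      if PySem.Str.isIn "+}" p.2 then
        let tri :=
          if 0 < p.1 ∧ p.1 + 1 < (xs.length : Int) then
            match dtnTuple3 (PySem.List.slice xs (some (p.1 - 1)) (some (p.1 + 2))) with
            | some t => st.2 ++ [t]
            | none => st.2
          else st.2
        (st.1 ++ [[]], tri)
      else (dtnAppendLast st.1 p.2, st.2))
    = (fun st p => (dtnNeStep st.1 p,
        (fun tri p => tri ++ (dtnTriOpt xs p).toList) st.2 p)) := by
    funext st p
    by_cases hm : PySem.Chars.isIn ['+', '}'] p.2.toList = true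
    · by_cases hi : 0 < p.1 ∧ p.1 + 1 < (xs.length : Int)
      · cases hs : dtnTuple3 (PySem.List.slice xs (some (p.1 - 1)) (some (p.1 + 2))) <;>
          simp [dtnNeStep, dtnTriOpt, hm, hi, hs]
      · simp [dtnNeStep, dtnTriOpt, hm, hi]
    · simp [dtnNeStep, dtnTriOpt, hm]
  rw [hstep, PySem.List.foldl_prod_mk (f := dtnNeStep)
    (g := fun tri p => tri ++ (dtnTriOpt xs p).toList)]
  rw [show ([[]] : List (List String)) = [] ++ [([] : List String)] from rfl, dtnA_ne]
  have hb := dtnB_ne xs xs 0 0 [] [] (by omega) (by omega) (by simp) (by simp)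
  simp only [List.nil_append] at hb ⊢
  rw [dtn_markers, hb, dtn_foldl_append_toList]
  refine congrArg (Prod.mk _) ?_
  rw [List.nil_append, ← dtn_markers xs 0, List.filterMap_filterMap]
  congr 1
  funext p
  by_cases hm : PySem.Chars.isIn ['+', '}'] p.2.toList = true <;>
    simp [dtnTriOpt, hm, Option.bind]
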